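-- pv_equiv track=rewrite | github.com/sunshine0677/KMOR | Kpurn_search.py | is_reasonable_path
-- ===== SOURCE A (Python) =====
-- from typing import Dict, List, Tuple, Iterable, Optional, Any, Set
--
-- def is_reasonable_path(path: List[str]) -> bool:
--     """检查路径是否合理"""
--     if len(path) > 30:  # 路径太长
--         return False
--
--     # 检查是否有明显的来回重复 (A -> B -> A 模式)
--     for i in range(1, len(path) - 1):
--         if path[i - 1] == path[i + 1]:
--             return False
--
--     # 检查单个节点重复次数
--     from collections import Counter
--     node_counts = Counter(path)
--     for count in node_counts.values():
--         if count > 3:  # 任何节点出现超过3次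
--             return False
--
--     return True
-- ===== SOURCE B (Python) =====
-- def is_reasonable_path(path):
--     if len(path) > 30:
--         return False
--     # A-B-A pattern: some element equals the one two positions later
--     if any(a == c for a, c in zip(path, path[2:])):
--         return False
--     # over-frequent node: scan runs of the sorted path
--     s = sorted(path)
--     run = 1
--     for prev, cur in zip(s, s[1:]):
--         if cur == prev:
--             run += 1
--             if run > 3:
--                 return False
--         else:
--             run = 1
--     return True
-- ===== Notes on version B (the rewrite author's own statement) =====
-- stated objective: alternative
-- what changed: The Counter hash-table frequency check is replaced by sorting the path and scanning it once for a run of more than 3 equal consecutive elements, and the index-based A-B-A loop by a zip over the list and its 2-shift.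
import Mathlib
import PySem

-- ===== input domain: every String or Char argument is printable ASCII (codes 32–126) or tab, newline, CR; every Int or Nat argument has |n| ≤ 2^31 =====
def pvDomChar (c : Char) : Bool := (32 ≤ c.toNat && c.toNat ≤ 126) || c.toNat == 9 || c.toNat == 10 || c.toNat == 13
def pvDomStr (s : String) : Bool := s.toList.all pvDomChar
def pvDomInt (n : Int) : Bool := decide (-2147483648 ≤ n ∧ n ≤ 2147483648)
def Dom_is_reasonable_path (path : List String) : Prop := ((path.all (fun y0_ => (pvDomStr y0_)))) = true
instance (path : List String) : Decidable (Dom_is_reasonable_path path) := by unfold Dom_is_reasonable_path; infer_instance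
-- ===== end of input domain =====

-- B replaces A's Counter frequency table by a sort-then-run-scan and the index
-- loop by a zip with the 2-shifted list (objective: alternative, same result).

-- ===== PORT A =====
-- literal port of A: length guard, index loop over range(1, len(path)-1)
-- comparing path[i-1] with path[i+1] (early return = .any), then
-- Counter(path) and a scan of its values for a count > 3.
def is_reasonable_path (path : List String) : Bool :=
  if path.length > 30 then false
  else if (PySem.List.pyRange 1 ((path.length : Int) - 1) 1).any
      (fun i => PySem.List.pyGet? path (i - 1) == PySem.List.pyGet? path (i + 1)) then false
  else if (PySem.Dict.counter path).values.any (fun c => c > 3) then false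
  else true

-- ===== PORT B =====
-- literal port of B: the run-scanning loop over zip(s, s[1:]) carrying the
-- current streak length `run` (early return = the recursion stopping at false).
def pvRunScan (prev : String) (run : Int) : List String → Bool
  | [] => true
  | cur :: rest =>
    if cur == prev then
      if run + 1 > 3 then false else pvRunScan cur (run + 1) rest
    else pvRunScan cur 1 rest

def is_reasonable_path_alt (path : List String) : Bool :=
  if path.length > 30 then false
  else if (path.zip (path.drop 2)).any (fun p => p.1 == p.2) then false
  else
    match PySem.List.sorted path (fun x => x) false with
    | [] => true
    | h :: t => pvRunScan h 1 t

-- ===== PRECONDITION & SPEC =====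
def Spec_is_reasonable_path (path : List String) (out : Bool) : Prop := out = is_reasonable_path_alt path
instance (path : List String) (out : Bool) : Decidable (Spec_is_reasonable_path path out) := by unfold Spec_is_reasonable_path; infer_instance

-- ===== CLAIM (what is proved, stated in full; the proofs are below) =====
def Claim_equal_is_reasonable_path : Prop := ∀ (path : List String), Dom_is_reasonable_path path → Spec_is_reasonable_path path (is_reasonable_path path)

-- ===== LEMMAS AND PROOFS =====

-- the two A-B-A checks agree: range(1, n-1) with path[i-1] == path[i+1]
-- is exactly zip(path, path[2:]) with a == c
lemma aba_eq (path : List String) :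
    (PySem.List.pyRange 1 ((path.length : Int) - 1) 1).any
      (fun i => PySem.List.pyGet? path (i - 1) == PySem.List.pyGet? path (i + 1))
    = (path.zip (path.drop 2)).any (fun p => p.1 == p.2) := by
  rw [Bool.eq_iff_iff]
  simp only [List.any_eq_true, PySem.List.mem_pyRange_one]
  constructor
  · rintro ⟨i, ⟨h1, h2⟩, hbeq⟩
    have hi1 : 0 ≤ i - 1 := by omega
    set j : Nat := (i - 1).toNat with hj
    have hjlen : j + 2 < path.length := by omega
    have hjz : j < (path.zip (path.drop 2)).length := by
      simp [List.length_zip]; omega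
    refine ⟨(path.zip (path.drop 2))[j], List.mem_iff_getElem.2 ⟨j, hjz, rfl⟩, ?_⟩
    rw [List.getElem_zip]
    simp only [List.getElem_drop]
    rw [PySem.List.pyGet?_of_nonneg _ hi1,
        PySem.List.pyGet?_of_nonneg _ (by omega : (0:Int) ≤ i + 1)] at hbeq
    have e1 : (i - 1).toNat = j := rfl
    have e2 : (i + 1).toNat = 2 + j := by omega
    rw [e2, List.getElem?_eq_getElem (by omega : j < path.length),
        List.getElem?_eq_getElem (by omega : 2 + j < path.length)] at hbeq
    simpa using hbeq
  · rintro ⟨p, hp, hb⟩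
    obtain ⟨j, hjz, hpe⟩ := List.mem_iff_getElem.1 hp
    have hjlen : j + 2 < path.length := by
      simp [List.length_zip] at hjz; omega
    refine ⟨(j : Int) + 1, ⟨by omega, by omega⟩, ?_⟩
    rw [← hpe, List.getElem_zip] at hb
    simp only [List.getElem_drop] at hb
    rw [PySem.List.pyGet?_of_nonneg _ (by omega : (0:Int) ≤ (j:Int) + 1 - 1),
        PySem.List.pyGet?_of_nonneg _ (by omega : (0:Int) ≤ (j:Int) + 1 + 1)]
    have e1 : ((j:Int) + 1 - 1).toNat = j := by omega
    have e2 : ((j:Int) + 1 + 1).toNat = 2 + j := by omega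
    rw [e1, e2, List.getElem?_eq_getElem (by omega : j < path.length),
        List.getElem?_eq_getElem (by omega : 2 + j < path.length)]
    simpa using hb

-- the run-scan over a ≤-sorted list (prev :: t) with current streak `run`
-- returns false exactly when some node's total count exceeds 3
lemma runScan_spec (t : List String) (prev : String) (run : Int)
    (hps : (prev :: t).Pairwise (· ≤ ·)) (h1 : 1 ≤ run) (h3 : run ≤ 3) :
    pvRunScan prev run t
      = !decide (3 < run + (t.count prev : Int) ∨ ∃ x ∈ t, x ≠ prev ∧ 3 < t.count x) := by
  induction t generalizing prev run with
  | nil => simp [pvRunScan]; omega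
  | cons cur rest ih =>
    rw [List.pairwise_cons] at hps
    obtain ⟨hle, hrest⟩ := hps
    have hcount_ne : ∀ y : String, y ≠ cur → (cur :: rest).count y = rest.count y := by
      intro y hy; simp [Ne.symm hy]
    have hcount_self : (cur :: rest).count cur = rest.count cur + 1 := by simp
    by_cases hc : cur = prev
    · subst hc
      rw [pvRunScan]
      simp only [beq_self_eq_true, if_true]
      by_cases hbig : run + 1 > 3
      · have hA : (3:Int) < run + (((cur :: rest).count cur : Nat) : Int) := by
          rw [hcount_self]; push_cast; omega
        rw [if_pos hbig]
        simp only [hA, true_or, decide_true, Bool.not_true]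
      · rw [if_neg hbig, ih cur (run+1) hrest (by omega) (by omega)]
        congr 1
        apply decide_eq_decide.2
        constructor
        · rintro (hcnt | ⟨x, hx, hne, hgt⟩)
          · left; rw [hcount_self]; omega
          · right; exact ⟨x, List.mem_cons_of_mem _ hx, hne, by rwa [hcount_ne x hne]⟩
        · rintro (hcnt | ⟨x, hx, hne, hgt⟩)
          · left; rw [hcount_self] at hcnt; push_cast at hcnt ⊢; omega
          · rcases List.mem_cons.1 hx with h | hx'
            · exact absurd h hne
            · right; exact ⟨x, hx', hne, by rwa [hcount_ne x hne] at hgt⟩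
    · rw [pvRunScan]
      have hbeq : (cur == prev) = false := by simp [hc]
      rw [hbeq, if_neg (by simp)]
      rw [ih cur 1 hrest (by omega) (by omega)]
      have hlt : prev < cur := lt_of_le_of_ne (hle cur List.mem_cons_self) (fun h => hc h.symm)
      have hge : ∀ x ∈ rest, cur ≤ x := (List.pairwise_cons.1 hrest).1
      have hcnt0 : (cur :: rest).count prev = 0 := by
        apply List.count_eq_zero.2
        intro hmem
        rcases List.mem_cons.1 hmem with h | hmem'
        · exact hc h.symm
        · exact absurd (hge prev hmem') (not_le.2 hlt)
      congr 1
      apply decide_eq_decide.2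
      constructor
      · rintro (hcnt | ⟨x, hx, hne, hgt⟩)
        · right
          refine ⟨cur, List.mem_cons_self, fun h => hc h, ?_⟩
          rw [hcount_self]; omega
        · have hxp : x ≠ prev := fun h => absurd (hge x hx) (not_le.2 (h ▸ hlt))
          right; exact ⟨x, List.mem_cons_of_mem _ hx, hxp, by rwa [hcount_ne x hne]⟩
      · rintro (hcnt | ⟨x, hx, hne, hgt⟩)
        · rw [hcnt0] at hcnt; push_cast at hcnt; omega
        · by_cases hxc : x = cur
          · subst hxc; left; rw [hcount_self] at hgt; omega
          · rcases List.mem_cons.1 hx with h | hx'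
            · exact absurd h hxc
            · right; exact ⟨x, hx', hxc, by rwa [hcount_ne x hxc] at hgt⟩

-- A's Counter-values scan, as an existence statement about counts
lemma counter_any (path : List String) :
    (PySem.Dict.counter path).values.any (fun c => c > 3)
      = decide (∃ x ∈ path, 3 < path.count x) := by
  rw [PySem.Dict.values_eq_map_keys _ (PySem.Dict.nodup_keys_counter path) 0]
  simp only [PySem.Dict.getD_counter, PySem.Dict.keys_counter, List.any_map]
  rw [Bool.eq_iff_iff]
  simp [List.any_eq_true, PySem.Set.mem_ofList]

-- ===== VERDICT (by name: the statement is the Claim_ definition above) =====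
theorem is_reasonable_path_spec : Claim_equal_is_reasonable_path := by
  intro path _
  unfold Spec_is_reasonable_path is_reasonable_path is_reasonable_path_alt
  by_cases h30 : path.length > 30
  · simp [h30]
  · rw [if_neg h30, if_neg h30, aba_eq]
    by_cases haba : (path.zip (path.drop 2)).any (fun p => p.1 == p.2) = true
    · rw [if_pos haba, if_pos haba]
    · rw [if_neg haba, if_neg haba, counter_any]
      rcases hs : PySem.List.sorted path (fun x => x) false with _ | ⟨h, t⟩
      · have hnil : path = [] := (PySem.List.sorted_eq_nil_iff _ _ _).1 hs
        subst hnil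
        simp
      · have hperm : (h :: t).Perm path := hs ▸ PySem.List.sorted_perm path (fun x => x) false
        have hpw : (h :: t).Pairwise (· ≤ ·) := by
          have := PySem.List.sorted_pairwise path (fun x => x) (κ := String)
          rw [hs] at this
          exact this
        show _ = pvRunScan h 1 t
        rw [runScan_spec t h 1 hpw (by omega) (by omega)]
        have hiff : (∃ x ∈ path, 3 < path.count x)
            ↔ (3 < 1 + (t.count h : Int) ∨ ∃ x ∈ t, x ≠ h ∧ 3 < t.count x) := by
          have hcnt : ∀ x : String, path.count x = (h :: t).count x :=
            fun x => (hperm.count_eq x).symm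
          constructor
          · rintro ⟨x, hx, hgt⟩
            rw [hcnt x] at hgt
            by_cases hxh : x = h
            · subst hxh
              left; rw [List.count_cons_self] at hgt; omega
            · rcases List.mem_cons.1 (hperm.mem_iff.2 hx) with hE | hxt
              · exact absurd hE hxh
              · right
                refine ⟨x, hxt, hxh, ?_⟩
                rwa [List.count_cons, if_neg (by simp [Ne.symm hxh])] at hgt
          · rintro (hgt | ⟨x, hx, hne, hgt⟩)
            · refine ⟨h, hperm.mem_iff.1 List.mem_cons_self, ?_⟩
              rw [hcnt h, List.count_cons_self]; omega
            · refine ⟨x, hperm.mem_iff.1 (List.mem_cons_of_mem _ hx), ?_⟩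
              rw [hcnt x, List.count_cons, if_neg (by simp [Ne.symm hne])]
              omega
        by_cases hP : ∃ x ∈ path, 3 < path.count x
        · simp [hP, hiff.1 hP]
        · simp [hP, (not_congr hiff).1 hP]
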